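-- pv_equiv track=rewrite | github.com/sbhandari-ids/PythonPrograms_ | warn_the_sheep.py | warn_the_sheep
-- ===== SOURCE A (Python) =====
-- def warn_the_sheep(queue):
--     animal_count = len(queue)
--     index = 0
--
--     for animal in queue :
--         index +=1
--         if animal == 'wolf':
--             wolf_position = index
--
--     sheep_in_danger_position = animal_count - wolf_position
--     if wolf_position == animal_count :
--         message = "Pls go away and stop eathing my sheep"
--     else : message = "Oi ! Sheep number "+ str(sheep_in_danger_position) +" ! You are about to be eaten by a wolf!"
--
--     return message
-- ===== SOURCE B (Python) =====
-- def warn_the_sheep(queue):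
--     dist = queue[::-1].index('wolf')
--     if dist == 0:
--         return "Pls go away and stop eathing my sheep"
--     return "Oi ! Sheep number " + str(dist) + " ! You are about to be eaten by a wolf!"
-- ===== Notes on version B (the rewrite author's own statement) =====
-- stated objective: simpler
-- what changed: Replaces the manual index-tracking loop over the whole queue (keeping the last wolf's 1-based position and subtracting) by reversing the queue and taking the index of the first 'wolf' there, which directly is the number of endangered sheep.
import Mathlib
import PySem

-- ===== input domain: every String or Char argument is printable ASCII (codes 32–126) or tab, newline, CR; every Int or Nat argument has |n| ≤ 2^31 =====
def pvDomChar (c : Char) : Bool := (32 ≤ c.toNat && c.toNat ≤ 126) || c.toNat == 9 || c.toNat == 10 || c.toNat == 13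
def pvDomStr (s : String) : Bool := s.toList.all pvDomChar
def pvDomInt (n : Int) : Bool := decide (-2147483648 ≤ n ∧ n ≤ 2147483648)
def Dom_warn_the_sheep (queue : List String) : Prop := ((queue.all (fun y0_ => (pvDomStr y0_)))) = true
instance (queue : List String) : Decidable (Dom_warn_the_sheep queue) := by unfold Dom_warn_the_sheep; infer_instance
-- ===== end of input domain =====

-- B replaces A's manual index-tracking loop (last wolf 1-based position, then a subtraction)
-- by the index of the first 'wolf' in the reversed queue; objective: simpler.


-- ===== PORT A =====
-- A: walk the queue keeping a 1-based index, recording it at each 'wolf' (so the LAST wolf wins);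
-- then sheep_in_danger = len - wolf_position.  'wolf_position' unbound (Python NameError) ↦ none, outside Pre_.
def warn_the_sheep (queue : List String) : String :=
  let animal_count : Int := queue.length
  let st := queue.foldl
    (fun (st : Int × Option Int) animal =>
      let index := st.1 + 1
      (index, if animal == "wolf" then some index else st.2))
    (0, none)
  match st.2 with
  | none => ""  -- Python raises NameError here; excluded by Pre_
  | some wolf_position =>
    let sheep_in_danger_position := animal_count - wolf_position
    if wolf_position == animal_count then
      "Pls go away and stop eathing my sheep"
    else
      "Oi ! Sheep number " ++ PySem.Int.toStr sheep_in_danger_position ++ " ! You are about to be eaten by a wolf!"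

-- ===== PORT B =====
-- B: dist = queue[::-1].index('wolf'); dist == 0 means the wolf is last.
def warn_the_sheep_alt (queue : List String) : String :=
  match PySem.List.slice? queue none none (-1) with
  | none => ""  -- unreachable: step = -1 ≠ 0
  | some rev =>
    match PySem.List.index? rev "wolf" with
    | none => ""  -- Python raises ValueError here; excluded by Pre_
    | some dist =>
      if dist == 0 then
        "Pls go away and stop eathing my sheep"
      else
        "Oi ! Sheep number " ++ PySem.Int.toStr (dist : Int) ++ " ! You are about to be eaten by a wolf!"

-- ===== PRECONDITION & SPEC =====
-- Pre_: both Pythons raise (A: NameError, B: ValueError) when the queue contains no 'wolf'.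
def Pre_warn_the_sheep (queue : List String) : Prop := "wolf" ∈ queue
instance (queue : List String) : Decidable (Pre_warn_the_sheep queue) := by unfold Pre_warn_the_sheep; infer_instance
def pvWitness_warn_the_sheep : List String := ["sheep", "wolf", "sheep"]

def Spec_warn_the_sheep (queue : List String) (out : String) : Prop := out = warn_the_sheep_alt queue
instance (queue : List String) (out : String) : Decidable (Spec_warn_the_sheep queue out) := by unfold Spec_warn_the_sheep; infer_instance

-- ===== CLAIM (what is proved, stated in full; the proofs are below) =====
def Claim_equal_warn_the_sheep : Prop := ∀ (queue : List String), Dom_warn_the_sheep queue → Pre_warn_the_sheep queue → Spec_warn_the_sheep queue (warn_the_sheep queue)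

-- ===== LEMMAS AND PROOFS =====

-- A's fold: the tracked option is the 1-based position of the LAST wolf, i.e. length minus
-- the index of the first wolf in the reversed list (generalized over the starting index i).
theorem foldA_characterize (xs : List String) (i : Int) (o : Option Int) :
    xs.foldl (fun (st : Int × Option Int) animal =>
        (st.1 + 1, if animal == "wolf" then some (st.1 + 1) else st.2)) (i, o)
      = (i + xs.length,
         match PySem.List.index? xs.reverse "wolf" with
         | some d => some (i + xs.length - d)
         | none => o) := by
  induction xs generalizing i o with
  | nil => simp [PySem.List.index?_eq_idxOf?]
  | cons x t ih =>
    simp only [List.foldl_cons, List.reverse_cons, ih, List.length_cons]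
    by_cases hw : "wolf" ∈ t.reverse
    · rw [PySem.List.index?_append_of_mem _ hw]
      rcases (PySem.List.index?_isSome_iff t.reverse "wolf").mpr hw |> Option.isSome_iff_exists.mp with ⟨d, hd⟩
      rw [hd]
      simp only [Prod.mk.injEq, Option.some.injEq]
      constructor <;> push_cast <;> omega
    · have hnone : PySem.List.index? t.reverse "wolf" = none :=
        (PySem.List.index?_eq_none_iff _ _).mpr hw
      rw [hnone]
      by_cases hx : x = "wolf"
      · subst hx
        rw [PySem.List.index?_append_singleton_self _ _ hw]
        simp
        omega
      · have : PySem.List.index? (t.reverse ++ [x]) "wolf" = none := by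
          apply (PySem.List.index?_eq_none_iff _ _).mpr
          simp [hw]
          exact fun h => hx h.symm
        rw [this]
        simp [hx]
        omega

-- ===== VERDICT (by name: the statement is the Claim_ definition above) =====
theorem warn_the_sheep_spec : Claim_equal_warn_the_sheep := by
  intro queue _hdom hpre
  unfold Spec_warn_the_sheep warn_the_sheep warn_the_sheep_alt
  rw [PySem.List.slice?_none_none_neg_one]
  have hmem : "wolf" ∈ queue.reverse := by simpa using hpre
  rcases (PySem.List.index?_isSome_iff queue.reverse "wolf").mpr hmem |> Option.isSome_iff_exists.mp with ⟨d, hd⟩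
  have hdlt : d < queue.length := by
    have ⟨hk, _, _⟩ := PySem.List.getElem_of_index?_eq_some hd
    simpa using hk
  simp only [foldA_characterize, hd, zero_add]
  have hsheep : (queue.length : Int) - ((queue.length : Int) - d) = (d : Int) := by omega
  by_cases h0 : d = 0
  · subst h0; simp
  · have hne : ¬ ((queue.length : Int) - (d : Int) == (queue.length : Int)) = true := by
      simp; omega
    simp only [hne, hsheep]
    simp [h0]
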